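-- pv_equiv track=rewrite | github.com/huynonstop/grinding-leetcode | leetcode/maxProfit4.py | sell_fee
-- ===== SOURCE A (Python) =====
-- def sell_fee(prices, fee):
--     n = len(prices)
--     if n <= 1:
--         return 0
--     buy_dp = [0] * n
--     buy_dp[0] = -prices[0]
--     sell_dp = [0] * n
--     for i in range(1, n):
--         # skip or buy
--         buy_dp[i] = max(buy_dp[i-1], -prices[i] + sell_dp[i-1])
--         # skip or sell
--         sell_dp[i] = max(
--             sell_dp[i - 1],
--             prices[i] + buy_dp[i - 1] - fee)
--     return sell_dp[n - 1]
-- ===== SOURCE B (Python) =====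
-- def sell_fee(prices, fee):
--     if len(prices) <= 1:
--         return 0
--     profit = 0
--     min_price = prices[0]
--     for price in prices[1:]:
--         if price < min_price:
--             min_price = price
--         elif price > min_price + fee:
--             profit += price - min_price - fee
--             min_price = price - fee
--     return profit
-- ===== Notes on version B (the rewrite author's own statement) =====
-- stated objective: simpler
-- what changed: Replaces the two per-day DP arrays (buy/sell states) with the O(1)-space greedy that tracks a single running effective minimum buy price and accumulates profit whenever a sale beats it by more than the fee; no list allocation or per-step indexing.
-- outside the precondition, e.g. on sell_fee([-2, -3], -4): A returns 3, B returns 0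
import Mathlib
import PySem

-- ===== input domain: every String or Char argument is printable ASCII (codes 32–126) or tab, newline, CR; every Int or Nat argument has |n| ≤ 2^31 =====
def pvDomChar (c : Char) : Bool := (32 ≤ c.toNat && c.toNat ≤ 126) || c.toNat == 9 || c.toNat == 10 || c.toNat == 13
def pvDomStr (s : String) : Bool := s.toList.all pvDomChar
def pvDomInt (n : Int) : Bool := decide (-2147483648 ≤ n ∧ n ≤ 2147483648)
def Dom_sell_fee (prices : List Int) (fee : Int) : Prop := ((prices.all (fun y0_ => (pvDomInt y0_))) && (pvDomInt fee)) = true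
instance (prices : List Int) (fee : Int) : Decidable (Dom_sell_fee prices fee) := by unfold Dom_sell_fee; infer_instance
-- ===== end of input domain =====

-- B replaces A's two per-day DP arrays by the O(1)-space greedy tracking a running
-- effective minimum buy price (objective: simpler).

-- ===== PORT A =====
def sell_fee (prices : List Int) (fee : Int) : Int :=
  let n : Int := prices.length
  if n ≤ 1 then 0
  else
    let buy_dp : List Int := List.replicate prices.length 0
    let buy_dp := PySem.List.pySetD buy_dp 0 (-(PySem.List.pyGetD prices 0 0))
    let sell_dp : List Int := List.replicate prices.length 0
    let fin := (PySem.List.pyRange 1 n 1).foldl (fun (st : List Int × List Int) i =>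
        let buy := PySem.List.pySetD st.1 i
          (max (PySem.List.pyGetD st.1 (i-1) 0)
               (-(PySem.List.pyGetD prices i 0) + PySem.List.pyGetD st.2 (i-1) 0))
        let sell := PySem.List.pySetD st.2 i
          (max (PySem.List.pyGetD st.2 (i-1) 0)
               (PySem.List.pyGetD prices i 0 + PySem.List.pyGetD buy (i-1) 0 - fee))
        (buy, sell)) (buy_dp, sell_dp)
    PySem.List.pyGetD fin.2 (n - 1) 0

-- ===== PORT B =====
def sell_fee_alt (prices : List Int) (fee : Int) : Int :=
  if (prices.length : Int) ≤ 1 then 0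
  else
    let st := (PySem.List.slice prices (some 1) none).foldl
      (fun (st : Int × Int) price =>
        if price < st.2 then (st.1, price)
        else if price > st.2 + fee then (st.1 + price - st.2 - fee, price - fee)
        else st)
      (0, PySem.List.pyGetD prices 0 0)
    st.1

-- ===== PRECONDITION & SPEC =====
-- Pre_ restricts to the function's natural domain of nonnegative transaction fees
-- (the LeetCode problem guarantees 0 ≤ fee); A still returns values for fee < 0,
-- where the greedy and the DP legitimately disagree.
def Pre_sell_fee (prices : List Int) (fee : Int) : Prop := 0 ≤ fee
instance (_prices : List Int) (fee : Int) : Decidable (Pre_sell_fee _prices fee) := by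
  unfold Pre_sell_fee; infer_instance
def pvWitness_sell_fee : List Int × Int := ([1, 3, 2, 8, 4, 9], 2)

def Spec_sell_fee (prices : List Int) (fee : Int) (out : Int) : Prop := out = sell_fee_alt prices fee
instance (prices : List Int) (fee : Int) (out : Int) : Decidable (Spec_sell_fee prices fee out) := by unfold Spec_sell_fee; infer_instance

-- ===== CLAIM (what is proved, stated in full; the proofs are below) =====
def Claim_equal_sell_fee : Prop := ∀ (prices : List Int) (fee : Int), Dom_sell_fee prices fee → Pre_sell_fee prices fee → Spec_sell_fee prices fee (sell_fee prices fee)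

-- ===== LEMMAS AND PROOFS =====

-- A's per-day DP transition on the pair (buy, sell); B's greedy transition on (profit, min_price).
def stepA (fee : Int) (st : Int × Int) (p : Int) : Int × Int :=
  (max st.1 (-p + st.2), max st.2 (p + st.1 - fee))
def stepG (fee : Int) (st : Int × Int) (p : Int) : Int × Int :=
  if p < st.2 then (st.1, p)
  else if p > st.2 + fee then (st.1 + p - st.2 - fee, p - fee)
  else st
theorem stepA_eq_stepG (fee : Int) (hfee : 0 ≤ fee) :
    ∀ (l : List Int) (profit mp : Int),
      l.foldl (stepA fee) (profit - mp, profit) =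
        ((l.foldl (stepG fee) (profit, mp)).1 - (l.foldl (stepG fee) (profit, mp)).2,
         (l.foldl (stepG fee) (profit, mp)).1) := by
  intro l
  induction l with
  | nil => intro profit mp; simp
  | cons p l ih =>
    intro profit mp
    have h : stepA fee (profit - mp, profit) p =
        ((stepG fee (profit, mp) p).1 - (stepG fee (profit, mp) p).2,
         (stepG fee (profit, mp) p).1) := by
      simp only [stepA, stepG]
      split_ifs with h1 h2 <;> simp <;> constructor <;> omega
    rcases hG : stepG fee (profit, mp) p with ⟨pr', mp'⟩
    simp only [List.foldl_cons, h, hG]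
    exact ih pr' mp'

theorem loopA_eq (prices : List Int) (fee : Int) :
    ∀ (m j : Nat) (b s : List Int), 1 ≤ j → j + m = prices.length →
      b.length = prices.length → s.length = prices.length →
      ((PySem.List.pyRange (j : Int) (prices.length : Int) 1).foldl
        (fun (st : List Int × List Int) i =>
          let buy := PySem.List.pySetD st.1 i
            (max (PySem.List.pyGetD st.1 (i-1) 0)
                 (-(PySem.List.pyGetD prices i 0) + PySem.List.pyGetD st.2 (i-1) 0))
          let sell := PySem.List.pySetD st.2 i
            (max (PySem.List.pyGetD st.2 (i-1) 0)
                 (PySem.List.pyGetD prices i 0 + PySem.List.pyGetD buy (i-1) 0 - fee))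
          (buy, sell)) (b, s)).2.getD (prices.length - 1) 0 =
      ((prices.drop j).foldl (stepA fee) (b.getD (j-1) 0, s.getD (j-1) 0)).2 := by
  intro m
  induction m with
  | zero =>
    intro j b s hj hn hb hs
    have hjn : j = prices.length := by omega
    rw [PySem.List.pyRange_one_eq_nil (by exact_mod_cast le_of_eq hjn.symm)]
    simp [hjn, List.drop_length]
  | succ m ih =>
    intro j b s hj hn hb hs
    have hjlt : j < prices.length := by omega
    rw [PySem.List.pyRange_one_cons (by exact_mod_cast hjlt)]
    have hcast : ((j : Int) + 1) = ((j + 1 : Nat) : Int) := by push_cast; ring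
    have hsub : ((j : Int) - 1) = ((j - 1 : Nat) : Int) := by omega
    simp only [List.foldl_cons, hcast, hsub, PySem.List.pySetD_natCast, PySem.List.pyGetD_natCast]
    have hset_ne : ∀ (xs : List Int) (v : Int), (xs.set j v).getD (j-1) 0 = xs.getD (j-1) 0 := by
      intro xs v
      simp [List.getD, List.getElem?_set_ne (by omega : j ≠ j - 1)]
    have hset_self : ∀ (xs : List Int) (v : Int), xs.length = prices.length →
        (xs.set j v).getD j 0 = v := by
      intro xs v hlen
      simp [List.getD, hlen, hjlt]
    rw [ih (j+1) _ _ (by omega) (by omega) (by simp [hb]) (by simp [hs])]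
    have hdrop : prices.drop j = prices[j] :: prices.drop (j+1) :=
      List.drop_eq_getElem_cons hjlt
    rw [hdrop, List.foldl_cons]
    have hpj : prices.getD j 0 = prices[j] := by
      simp [List.getD, List.getElem?_eq_getElem hjlt]
    simp only [Nat.add_sub_cancel, hset_ne, hpj, stepA]
    rw [hset_self _ _ hb, hset_self _ _ hs]

theorem main_eq : ∀ (prices : List Int) (fee : Int), 0 ≤ fee →
    sell_fee prices fee = sell_fee_alt prices fee := by
  intro prices fee hfee
  unfold sell_fee sell_fee_alt
  by_cases h : (prices.length : Int) ≤ 1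
  · simp [h]
  · simp only [h, if_false]
    have hlen : 2 ≤ prices.length := by omega
    have hstep : (fun (st : Int × Int) price =>
        if price < st.2 then (st.1, price)
        else if price > st.2 + fee then (st.1 + price - st.2 - fee, price - fee)
        else st) = stepG fee := rfl
    rw [PySem.List.slice_from_one, hstep]
    have hidx : ((prices.length : Int) - 1) = ((prices.length - 1 : Nat) : Int) := by omega
    rw [hidx, PySem.List.pyGetD_natCast]
    refine Eq.trans (loopA_eq prices fee (prices.length - 1) 1
      (PySem.List.pySetD (List.replicate prices.length (0:Int)) 0
        (-(PySem.List.pyGetD prices 0 0)))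
      (List.replicate prices.length 0) le_rfl (by omega) (by simp) (by simp)) ?_
    have hb0 : (PySem.List.pySetD (List.replicate prices.length (0:Int)) 0
        (-(PySem.List.pyGetD prices 0 0))).getD 0 0 = -(PySem.List.pyGetD prices 0 0) := by
      have h0 : (0:Nat) < prices.length := by omega
      rw [PySem.List.pySetD_of_nonneg (xs := List.replicate prices.length (0:Int))
        (i := 0) (v := -(PySem.List.pyGetD prices 0 0)) le_rfl]
      simp only [Int.toNat_zero, List.getD]
      rw [List.getElem?_set_self (by simpa using h0)]
      rfl
    rw [hb0]
    have hs0 : (List.replicate prices.length (0:Int)).getD 0 0 = 0 := by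
      simp
    rw [hs0, List.drop_one,
      show -(PySem.List.pyGetD prices 0 0) = 0 - PySem.List.pyGetD prices 0 0 by ring,
      stepA_eq_stepG fee hfee prices.tail 0 (PySem.List.pyGetD prices 0 0)]

-- ===== VERDICT (by name: the statement is the Claim_ definition above) =====
theorem sell_fee_spec : Claim_equal_sell_fee := by
  intro prices fee _hdom hpre
  unfold Spec_sell_fee
  exact main_eq prices fee hpre
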